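-- pv_equiv track=rewrite | github.com/krjj21/TradingAgents | FinWorld/finworld/plot/distribution.py | _create_color_scheme
-- ===== SOURCE A (Python) =====
-- from typing import List, Dict
--
-- def _create_color_scheme(pools: List[str]) -> Dict[str, str]:
--     """
--     Create a high-contrast color scheme by cyclically selecting from darker yellow, green, and blue color families.
--
--     Args:
--         pools (List[str]): A list of pool names.
--
--     Returns:
--         Dict[str, str]: A dictionary mapping each pool to a unique color.
--     """
--
--     # Define darker yellow color family
--     yellow_colors = [
--         "#FFB74D", "#FFA726", "#FF9800", "#FB8C00",
--         "#F57C00", "#EF6C00", "#E65100"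
--     ]
--
--     # Define darker green color family
--     green_colors = [
--         "#81C784", "#66BB6A", "#4CAF50", "#43A047",
--         "#388E3C", "#2E7D32", "#1B5E20"
--     ]
--
--     # Define darker blue color family
--     blue_colors = [
--         "#64B5F6", "#42A5F5", "#2196F3", "#1E88E5",
--         "#1976D2", "#1565C0", "#0D47A1"
--     ]
--
--     # Group colors by family for round-robin assignment
--     color_families = [yellow_colors, green_colors, blue_colors]
--
--     color_scheme = {}
--     family_index = 0  # Tracks which color family to use
--     color_indices = [0, 0, 0]  # Individual index for each color family
--
--     for pool in pools:
--         # Select current color family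
--         family = color_families[family_index]
--         # Select color from the current family
--         color = family[color_indices[family_index] % len(family)]
--         # Assign color to the symbol
--         color_scheme[pool] = color
--         # Update the index for current family
--         color_indices[family_index] += 1
--         # Rotate to next family
--         family_index = (family_index + 1) % len(color_families)
--
--     return color_scheme
-- ===== SOURCE B (Python) =====
-- from typing import List, Dict
--
-- def _create_color_scheme(pools: List[str]) -> Dict[str, str]:
--     yellow_colors = [
--         "#FFB74D", "#FFA726", "#FF9800", "#FB8C00",
--         "#F57C00", "#EF6C00", "#E65100"
--     ]
--     green_colors = [
--         "#81C784", "#66BB6A", "#4CAF50", "#43A047",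
--         "#388E3C", "#2E7D32", "#1B5E20"
--     ]
--     blue_colors = [
--         "#64B5F6", "#42A5F5", "#2196F3", "#1E88E5",
--         "#1976D2", "#1565C0", "#0D47A1"
--     ]
--     # Interleave the three families into one 21-color round-robin cycle,
--     # tile it to cover all pools, and pair pools with colors directly.
--     palette = [c for triple in zip(yellow_colors, green_colors, blue_colors)
--                  for c in triple]
--     reps = -(-len(pools) // len(palette))
--     return dict(zip(pools, palette * reps))
-- ===== Notes on version B (the rewrite author's own statement) =====
-- stated objective: alternative
-- what changed: Instead of walking pools with mutable round-robin state (or any per-index arithmetic), B precomputes the full 21-color cycle by interleaving the three families with zip, tiles it with list repetition to cover all pools, and builds the result as dict(zip(pools, tiled_palette)) with no loop over pools at all.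
import Mathlib
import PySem

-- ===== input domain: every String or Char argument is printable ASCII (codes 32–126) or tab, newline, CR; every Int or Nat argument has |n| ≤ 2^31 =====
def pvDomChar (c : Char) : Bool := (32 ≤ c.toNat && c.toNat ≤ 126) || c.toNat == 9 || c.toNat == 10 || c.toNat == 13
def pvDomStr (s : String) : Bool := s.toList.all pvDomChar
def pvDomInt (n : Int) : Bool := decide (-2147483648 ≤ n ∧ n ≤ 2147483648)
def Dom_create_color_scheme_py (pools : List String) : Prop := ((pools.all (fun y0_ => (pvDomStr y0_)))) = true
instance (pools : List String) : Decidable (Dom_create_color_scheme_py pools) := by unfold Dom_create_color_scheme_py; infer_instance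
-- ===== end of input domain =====

-- B replaces A's stateful round-robin walk over pools with a staged construction: interleave the
-- three families into one 21-color cycle, tile it to cover all pools, and dict(zip(pools, tiled))
-- (objective: alternative decomposition, same cost).
-- ===== PORT A =====
def pvYellow : List String :=
  ["#FFB74D", "#FFA726", "#FF9800", "#FB8C00", "#F57C00", "#EF6C00", "#E65100"]
def pvGreen : List String :=
  ["#81C784", "#66BB6A", "#4CAF50", "#43A047", "#388E3C", "#2E7D32", "#1B5E20"]
def pvBlue : List String :=
  ["#64B5F6", "#42A5F5", "#2196F3", "#1E88E5", "#1976D2", "#1565C0", "#0D47A1"]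
def pvFamilies : List (List String) := [pvYellow, pvGreen, pvBlue]

-- one iteration of A's for-loop; state = (color_scheme, family_index, color_indices)
def pvStepA (st : PySem.Dict String String × Int × List Int) (pool : String) :
    PySem.Dict String String × Int × List Int :=
  let d := st.1
  let fi := st.2.1
  let ci := st.2.2
  let family := PySem.List.pyGetD pvFamilies fi []
  let color := PySem.List.pyGetD family
      (PySem.Int.mod (PySem.List.pyGetD ci fi 0) (family.length : Int)) ""
  let d' := d.insert pool color
  let ci' := PySem.List.pySetD ci fi (PySem.List.pyGetD ci fi 0 + 1)
  (d', PySem.Int.mod (fi + 1) 3, ci')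

def create_color_scheme_py (pools : List String) : List (String × String) :=
  (pools.foldl pvStepA (PySem.Dict.empty, 0, [0, 0, 0])).1.items

-- ===== PORT B =====
-- palette = [c for triple in zip(yellow, green, blue) for c in triple]
def pvPalette : List String :=
  (pvYellow.zip (pvGreen.zip pvBlue)).flatMap (fun t => [t.1, t.2.1, t.2.2])

-- reps = -(-len(pools) // len(palette)); dict(zip(pools, palette * reps))
def create_color_scheme_py_alt (pools : List String) : List (String × String) :=
  let reps : Int := -(PySem.Int.floordiv (-(pools.length : Int)) (pvPalette.length : Int))
  ((pools.zip (PySem.List.pyRepeat pvPalette reps)).foldl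
      (fun d p => d.insert p.1 p.2) (PySem.Dict.empty : PySem.Dict String String)).items

-- ===== PRECONDITION & SPEC =====
def Spec_create_color_scheme_py (pools : List String) (out : List (String × String)) : Prop := out = create_color_scheme_py_alt pools
instance (pools : List String) (out : List (String × String)) : Decidable (Spec_create_color_scheme_py pools out) := by unfold Spec_create_color_scheme_py; infer_instance

-- ===== CLAIM (what is proved, stated in full; the proofs are below) =====
def Claim_equal_create_color_scheme_py : Prop := ∀ (pools : List String), Dom_create_color_scheme_py pools → Spec_create_color_scheme_py pools (create_color_scheme_py pools)

-- ===== LEMMAS AND PROOFS =====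

-- proof-side closed form: the color A assigns at overall position i
def pvColorAt (i : Int) : String :=
  let fam := PySem.List.pyGetD pvFamilies (PySem.Int.mod i 3) []
  PySem.List.pyGetD fam
    (PySem.Int.mod (PySem.Int.floordiv i 3) (fam.length : Int)) ""

-- one step of A, started at overall position i, inserts pvColorAt i and moves the
-- state to position i+1 (family_index = i % 3; color_indices entry j = (i + 2 - j) / 3)
lemma pv_key (i : Nat) (d : PySem.Dict String String) (x : String) :
      pvStepA (d, ((i % 3 : Nat) : Int),
        [(((i + 2) / 3 : Nat) : Int), (((i + 1) / 3 : Nat) : Int), ((i / 3 : Nat) : Int)]) x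
        = (d.insert x (pvColorAt (i : Int)), (((i + 1) % 3 : Nat) : Int),
           [((((i + 1) + 2) / 3 : Nat) : Int), ((((i + 1) + 1) / 3 : Nat) : Int), (((i + 1) / 3 : Nat) : Int)]) := by
  have m3 : PySem.Int.mod (i : Int) 3 = ((i % 3 : Nat) : Int) := by
    rw [PySem.Int.mod_eq_emod_of_pos (by norm_num)]; push_cast; omega
  have f3 : PySem.Int.floordiv (i : Int) 3 = ((i / 3 : Nat) : Int) := by
    rw [PySem.Int.floordiv_eq_ediv_of_pos (by norm_num)]; push_cast; omega
  have h3 : i % 3 = 0 ∨ i % 3 = 1 ∨ i % 3 = 2 := by omega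
  rcases h3 with h | h | h
  · have hB : (i + 2) / 3 = i / 3 := by omega
    have hC : (i + 1) / 3 = i / 3 := by omega
    have hA : (i + 1 + 2) / 3 = i / 3 + 1 := by omega
    have hM : (i + 1) % 3 = 1 := by omega
    simp only [pvStepA, pvColorAt, m3, f3, h, hA, hB, hC, hM, Nat.cast_zero, Nat.cast_one,
      Nat.cast_add, PySem.List.pyGetD_zero_cons]
    norm_num [PySem.List.pySetD_of_nonneg]
  · have hB : (i + 2) / 3 = i / 3 + 1 := by omega
    have hC : (i + 1) / 3 = i / 3 := by omega
    have hA : (i + 1 + 2) / 3 = i / 3 + 1 := by omega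
    have hD : (i + 1 + 1) / 3 = i / 3 + 1 := by omega
    have hM : (i + 1) % 3 = 2 := by omega
    simp only [pvStepA, pvColorAt, m3, f3, h, hA, hB, hC, hM, Nat.cast_one, Nat.cast_add,
      Nat.cast_ofNat]
    norm_num [PySem.List.pyGetD, PySem.List.pyGet?, PySem.List.pyIdx?,
      PySem.List.pySetD_of_nonneg, pvFamilies, pvYellow, pvGreen, pvBlue,
      (show ((2:Int)).toNat = 2 from rfl), (show ((1:Int)).toNat = 1 from rfl)]
  · have hB : (i + 2) / 3 = i / 3 + 1 := by omega
    have hC : (i + 1) / 3 = i / 3 + 1 := by omega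
    have hA : (i + 1 + 2) / 3 = i / 3 + 1 := by omega
    have hD : (i + 1 + 1) / 3 = i / 3 + 1 := by omega
    have hM : (i + 1) % 3 = 0 := by omega
    simp only [pvStepA, pvColorAt, m3, f3, h, hA, hB, hC, hM, Nat.cast_zero,
      Nat.cast_add, Nat.cast_one, Nat.cast_ofNat]
    norm_num [PySem.List.pyGetD, PySem.List.pyGet?, PySem.List.pyIdx?,
      PySem.List.pySetD_of_nonneg, pvFamilies, pvYellow, pvGreen, pvBlue,
      (show ((2:Int)).toNat = 2 from rfl), (show ((1:Int)).toNat = 1 from rfl)]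

-- A's fold, started at overall position i, builds the dict that inserts pvColorAt for each index
lemma pv_loop_eq (pools : List String) : ∀ (i : Nat) (d : PySem.Dict String String),
    (pools.foldl pvStepA (d, ((i % 3 : Nat) : Int),
        [(((i + 2) / 3 : Nat) : Int), (((i + 1) / 3 : Nat) : Int), ((i / 3 : Nat) : Int)])).1
      = (PySem.List.enumerate pools (i : Int)).foldl
          (fun d p => d.insert p.2 (pvColorAt p.1)) d := by
  induction pools with
  | nil => intro i d; simp [PySem.List.enumerate]
  | cons x xs ih =>
    intro i d
    rw [PySem.List.enumerate_cons]
    simp only [List.foldl_cons, pv_key]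
    have := ih (i + 1) (d.insert x (pvColorAt (i : Int)))
    push_cast at this ⊢
    exact this

lemma pv_palette_len : pvPalette.length = 21 := by rfl

-- the closed-form color at position j is the palette entry at j % 21
lemma pv_color_eq (j : Nat) : pvColorAt (j : Int) = pvPalette.getD (j % 21) "" := by
  have m3 : PySem.Int.mod (j : Int) 3 = ((j % 3 : Nat) : Int) := by
    rw [PySem.Int.mod_eq_emod_of_pos (by norm_num)]; push_cast; omega
  have f3 : PySem.Int.floordiv (j : Int) 3 = ((j / 3 : Nat) : Int) := by
    rw [PySem.Int.floordiv_eq_ediv_of_pos (by norm_num)]; push_cast; omega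
  have hr : j % 21 = 3 * (j / 3 % 7) + j % 3 := by omega
  have h3 : j % 3 = 0 ∨ j % 3 = 1 ∨ j % 3 = 2 := by omega
  unfold pvColorAt
  rw [m3, f3]
  rcases h3 with h | h | h <;>
  · rw [h] at hr ⊢
    have hq : j / 3 % 7 < 7 := by omega
    have m7 : PySem.Int.mod ((j / 3 : Nat) : Int)
        ((PySem.List.pyGetD pvFamilies ((0:Nat):Int) []).length : Int) = ((j / 3 % 7 : Nat) : Int) ∧
        PySem.Int.mod ((j / 3 : Nat) : Int)
        ((PySem.List.pyGetD pvFamilies ((1:Nat):Int) []).length : Int) = ((j / 3 % 7 : Nat) : Int) ∧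
        PySem.Int.mod ((j / 3 : Nat) : Int)
        ((PySem.List.pyGetD pvFamilies ((2:Nat):Int) []).length : Int) = ((j / 3 % 7 : Nat) : Int) := by
      refine ⟨?_, ?_, ?_⟩ <;>
      · rw [show ((PySem.List.pyGetD pvFamilies _ []).length : Int) = (7:Int) from rfl,
          PySem.Int.mod_eq_emod_of_pos (by norm_num)]
        push_cast; omega
    rw [hr]
    interval_cases hq' : j / 3 % 7 <;>
      simp_all <;> rfl

-- tiling: entry j of palette * m is the palette entry at j % 21
lemma pv_repeat_get : ∀ (m j : Nat), j < 21 * m →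
    (List.replicate m pvPalette).flatten.getD j "" = pvPalette.getD (j % 21) "" := by
  intro m
  induction m with
  | zero => intro j h; omega
  | succ m ih =>
    intro j h
    rw [List.replicate_succ, List.flatten_cons]
    by_cases hj : j < 21
    · rw [List.getD_eq_getElem?_getD, List.getElem?_append_left (by rw [pv_palette_len]; omega),
        ← List.getD_eq_getElem?_getD, Nat.mod_eq_of_lt hj]
    · rw [List.getD_eq_getElem?_getD, List.getElem?_append_right (by rw [pv_palette_len]; omega),
        ← List.getD_eq_getElem?_getD, pv_palette_len, ih (j - 21) (by omega)]
      congr 1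
      omega

lemma pv_repeat_len (m : Nat) : (List.replicate m pvPalette).flatten.length = 21 * m := by
  induction m with
  | zero => rfl
  | succ m ih => rw [List.replicate_succ, List.flatten_cons, List.length_append, ih, pv_palette_len]; ring

-- zipping pools with any list that carries pvColorAt (k+j) at position j
-- builds the same dict as the indexed insertion loop
lemma pv_zip_fold : ∀ (ps : List String) (tl : List String) (k : Nat) (d : PySem.Dict String String),
    ps.length ≤ tl.length →
    (∀ j, j < tl.length → tl.getD j "" = pvColorAt ((k + j : Nat) : Int)) →
    (ps.zip tl).foldl (fun d p => d.insert p.1 p.2) d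
      = (PySem.List.enumerate ps (k : Int)).foldl
          (fun d p => d.insert p.2 (pvColorAt p.1)) d := by
  intro ps
  induction ps with
  | nil => intro tl k d _ _; simp [PySem.List.enumerate]
  | cons x xs ih =>
    intro tl k d hlen hcol
    cases tl with
    | nil => simp at hlen
    | cons t tl' =>
      rw [PySem.List.enumerate_cons, List.zip_cons_cons, List.foldl_cons, List.foldl_cons]
      have ht : t = pvColorAt (k : Int) := by
        have := hcol 0 (by simp)
        simpa using this
      rw [ht]
      have hcast : ((k : Int) + 1) = ((k + 1 : Nat) : Int) := by push_cast; ring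
      rw [hcast]
      apply ih tl' (k + 1) _ (by simpa using hlen)
      intro j hj
      have := hcol (j + 1) (by simpa using Nat.succ_lt_succ hj)
      simpa [Nat.add_assoc, Nat.add_comm 1 j, Nat.add_left_comm] using this

-- the tiled palette is long enough: reps = ceil(n / 21)
lemma pv_reps (n : Nat) :
    (-(PySem.Int.floordiv (-(n : Int)) 21)).toNat = (n + 20) / 21 := by
  rw [PySem.Int.floordiv_eq_ediv_of_pos (by norm_num)]
  omega

lemma pv_spec_aux (pools : List String) :
    create_color_scheme_py pools = create_color_scheme_py_alt pools := by
  unfold create_color_scheme_py create_color_scheme_py_alt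
  rw [pv_palette_len]
  have hA := pv_loop_eq pools 0 PySem.Dict.empty
  norm_num at hA
  rw [hA]
  show _ = ((pools.zip (PySem.List.pyRepeat pvPalette
      (-(PySem.Int.floordiv (-(pools.length : Int)) ((21:Nat) : Int))))).foldl
      (fun d p => d.insert p.1 p.2) PySem.Dict.empty).items
  unfold PySem.List.pyRepeat
  set m := (-(PySem.Int.floordiv (-(pools.length : Int)) ((21:Nat):Int))).toNat with hm
  have hmv : m = (pools.length + 20) / 21 := by
    rw [hm, show (((21:Nat)):Int) = (21:Int) from by norm_num, pv_reps]
  congr 1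
  rw [pv_zip_fold pools (List.replicate m pvPalette).flatten 0 PySem.Dict.empty
      (by rw [pv_repeat_len, hmv]; omega)
      (fun j hj => by
        rw [pv_repeat_len] at hj
        rw [pv_repeat_get m j hj, Nat.zero_add, pv_color_eq j])]
  norm_num

-- ===== VERDICT (by name: the statement is the Claim_ definition above) =====
theorem create_color_scheme_py_spec : Claim_equal_create_color_scheme_py := by
  intro pools _
  unfold Spec_create_color_scheme_py
  exact pv_spec_aux pools
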